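-- pv_equiv track=rewrite | github.com/PreludeAndFugue/AdventOfCode | 2015/day06.py | part2
-- ===== SOURCE A (Python) =====
-- def part2(data):
--     grid = [[0 for _ in range(1000)] for _ in range(1000)]
--     for command in data:
--         (x1, y1), (x2, y2) = command[1], command[2]
--         instruction = command[0]
--         for x in range(x1, x2 + 1):
--             for y in range(y1, y2 + 1):
--                 if instruction == 'on':
--                     grid[x][y] = grid[x][y] + 1
--                 elif instruction == 'off':
--                     grid[x][y] = 0 if grid[x][y] == 0 else grid[x][y] - 1
--                 else:
--                     grid[x][y] = grid[x][y] + 2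
--
--     return sum(sum(row) for row in grid)
-- ===== SOURCE B (Python) =====
-- def part2(data):
--     # Coordinate compression: cut the plane into blocks on which every command's
--     # rectangle test is constant, replay the commands once per block, weight by area.
--     def clip(v):
--         return min(max(v, 0), 1000)
--     xcuts = sorted({0, 1000} | {clip(c[1][0]) for c in data} | {clip(c[2][0] + 1) for c in data})
--     ycuts = sorted({0, 1000} | {clip(c[1][1]) for c in data} | {clip(c[2][1] + 1) for c in data})
--     total = 0
--     for xa, xb in zip(xcuts, xcuts[1:]):
--         rel = [(ins, p[1], q[1]) for ins, p, q in data if p[0] <= xa <= q[0]]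
--         for ya, yb in zip(ycuts, ycuts[1:]):
--             v = 0
--             for ins, y1, y2 in rel:
--                 if y1 <= ya <= y2:
--                     if ins == 'on':
--                         v += 1
--                     elif ins == 'off':
--                         v = 0 if v == 0 else v - 1
--                     else:
--                         v += 2
--             total += v * (xb - xa) * (yb - ya)
--     return total
-- ===== Notes on version B (the rewrite author's own statement) =====
-- stated objective: alternative
-- what changed: Replaces A's per-cell simulation of the whole 1000x1000 grid with coordinate compression: the clamped brightness ops are replayed once per compressed rectangular block and weighted by the block's area.
-- outside the precondition, e.g. on part2([('on', (-1, 0), (-1, 0))]): A returns 1, B returns 0; on part2([('on', (0, 0), (1000, 0))]): A raises IndexError, B returns 1000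
import Mathlib
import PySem

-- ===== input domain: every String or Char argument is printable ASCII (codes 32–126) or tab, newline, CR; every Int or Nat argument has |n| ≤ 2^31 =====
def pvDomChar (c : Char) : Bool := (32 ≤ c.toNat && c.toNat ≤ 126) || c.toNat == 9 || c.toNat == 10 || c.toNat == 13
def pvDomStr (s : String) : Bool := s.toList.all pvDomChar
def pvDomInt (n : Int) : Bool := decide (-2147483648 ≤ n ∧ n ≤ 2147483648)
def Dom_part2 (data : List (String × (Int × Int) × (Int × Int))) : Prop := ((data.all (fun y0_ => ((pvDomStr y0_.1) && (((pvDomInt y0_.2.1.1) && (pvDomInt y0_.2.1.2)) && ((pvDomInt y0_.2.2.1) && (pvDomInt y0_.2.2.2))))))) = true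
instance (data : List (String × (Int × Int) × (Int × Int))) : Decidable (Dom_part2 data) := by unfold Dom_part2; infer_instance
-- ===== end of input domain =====

-- B replaces A's per-cell simulation of the whole 1000×1000 grid by coordinate
-- compression: the clamped brightness ops are replayed once per compressed block
-- and weighted by the block's area (objective: alternative).

-- ===== PORT A =====
def part2 (data : List (String × (Int × Int) × (Int × Int))) : Int :=
  let grid : List (List Int) :=
    (PySem.List.pyRange 0 1000 1).map (fun _ => (PySem.List.pyRange 0 1000 1).map (fun _ => (0 : Int)))
  let grid := data.foldl (fun grid command =>
    let ins := command.1
    let x1 := command.2.1.1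
    let y1 := command.2.1.2
    let x2 := command.2.2.1
    let y2 := command.2.2.2
    (PySem.List.pyRange x1 (x2 + 1) 1).foldl (fun grid x =>
      (PySem.List.pyRange y1 (y2 + 1) 1).foldl (fun grid y =>
        let row := PySem.List.pyGetD grid x []
        let v := PySem.List.pyGetD row y 0
        let v' := if ins = "on" then v + 1
                  else if ins = "off" then (if v = 0 then 0 else v - 1)
                  else v + 2
        PySem.List.pySetD grid x (PySem.List.pySetD row y v')) grid) grid) grid
  (grid.map (fun row => row.sum)).sum

-- ===== PORT B =====
def pvClip (v : Int) : Int := min (max v 0) 1000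

def part2_alt (data : List (String × (Int × Int) × (Int × Int))) : Int :=
  let xcuts := PySem.List.sorted (PySem.Set.ofList
    ([(0 : Int), 1000] ++ data.map (fun c => pvClip c.2.1.1) ++ data.map (fun c => pvClip (c.2.2.1 + 1)))) (fun x => x) false
  let ycuts := PySem.List.sorted (PySem.Set.ofList
    ([(0 : Int), 1000] ++ data.map (fun c => pvClip c.2.1.2) ++ data.map (fun c => pvClip (c.2.2.2 + 1)))) (fun x => x) false
  (xcuts.zip xcuts.tail).foldl (fun total p =>
    let rel := (data.filter (fun c => decide (c.2.1.1 ≤ p.1 ∧ p.1 ≤ c.2.2.1))).map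
      (fun c => (c.1, c.2.1.2, c.2.2.2))
    (ycuts.zip ycuts.tail).foldl (fun total q =>
      let v := rel.foldl (fun v r =>
        if r.2.1 ≤ q.1 ∧ q.1 ≤ r.2.2 then
          (if r.1 = "on" then v + 1 else if r.1 = "off" then (if v = 0 then 0 else v - 1) else v + 2)
        else v) 0
      total + v * (p.2 - p.1) * (q.2 - q.1)) total) 0

-- ===== PRECONDITION & SPEC =====
-- Pre_ restricts every command with a nonempty rectangle to the 1000×1000 grid — the task's
-- natural domain: outside it A raises IndexError (coordinates past the grid) or falls into
-- Python's negative-index wraparound, while B counts only grid cells.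
def Pre_part2 (data : List (String × (Int × Int) × (Int × Int))) : Prop :=
  ∀ c ∈ data, (c.2.2.1 < c.2.1.1 ∨ c.2.2.2 < c.2.1.2) ∨
    (0 ≤ c.2.1.1 ∧ c.2.2.1 ≤ 999 ∧ 0 ≤ c.2.1.2 ∧ c.2.2.2 ≤ 999)
instance (data : List (String × (Int × Int) × (Int × Int))) : Decidable (Pre_part2 data) := by unfold Pre_part2; infer_instance

def pvWitness_part2 : (List (String × (Int × Int) × (Int × Int))) :=
  [("on", (0, 0), (2, 1)), ("toggle", (1, 1), (3, 3)), ("off", (0, 0), (1, 2))]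

def Spec_part2 (data : List (String × (Int × Int) × (Int × Int))) (out : Int) : Prop := out = part2_alt data
instance (data : List (String × (Int × Int) × (Int × Int))) (out : Int) : Decidable (Spec_part2 data out) := by unfold Spec_part2; infer_instance

-- ===== CLAIM (what is proved, stated in full; the proofs are below) =====
def Claim_equal_part2 : Prop := ∀ (data : List (String × (Int × Int) × (Int × Int))), Dom_part2 data → Pre_part2 data → Spec_part2 data (part2 data)

-- ===== LEMMAS AND PROOFS =====

theorem pvRowSet {α : Type} (f : Int → α) (y : Int) (v : α) (h0 : 0 ≤ y) (h1 : y < 1000) :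
    PySem.List.pySetD ((PySem.List.pyRange 0 1000 1).map f) y v
      = (PySem.List.pyRange 0 1000 1).map (fun y' => if y' = y then v else f y') := by
  rw [PySem.List.pySetD_of_nonneg _ _ h0]
  apply List.ext_getElem
  · simp [PySem.List.length_pyRange_one]
  · intro k hk1 hk2
    have hk : k < 1000 := by
      simpa [PySem.List.length_pyRange_one] using hk1
    simp only [List.getElem_set, List.getElem_map, PySem.List.getElem_pyRange_one]
    split_ifs with h h' h' <;> first | rfl | (exfalso; omega)

def pvGrid (g : Int → Int → Int) : List (List Int) :=
  (PySem.List.pyRange 0 1000 1).map (fun x => (PySem.List.pyRange 0 1000 1).map (fun y => g x y))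

theorem pvGridSet (g : Int → Int → Int) (h : Int → Int) (x : Int) (h0 : 0 ≤ x) (h1 : x < 1000) :
    PySem.List.pySetD (pvGrid g) x ((PySem.List.pyRange 0 1000 1).map h)
      = pvGrid (fun x' y => if x' = x then h y else g x' y) := by
  unfold pvGrid
  rw [pvRowSet (fun x' => (PySem.List.pyRange 0 1000 1).map (fun y => g x' y)) x _ h0 h1]
  apply List.map_congr_left
  intro x' _
  by_cases hx : x' = x <;> simp [hx]

def pvOp (ins : String) (v : Int) : Int :=
  if ins = "on" then v + 1 else if ins = "off" then (if v = 0 then 0 else v - 1) else v + 2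

theorem pvGrid_congr {g g' : Int → Int → Int} (h : ∀ x y, g x y = g' x y) :
    pvGrid g = pvGrid g' :=
  congrArg pvGrid (funext fun x => funext fun y => h x y)

theorem pvStep (ins : String) (g : Int → Int → Int) (x y : Int)
    (hx0 : 0 ≤ x) (hx1 : x < 1000) (hy0 : 0 ≤ y) (hy1 : y < 1000) :
    (let row := PySem.List.pyGetD (pvGrid g) x []
     let v := PySem.List.pyGetD row y 0
     let v' := if ins = "on" then v + 1
               else if ins = "off" then (if v = 0 then 0 else v - 1)
               else v + 2
     PySem.List.pySetD (pvGrid g) x (PySem.List.pySetD row y v'))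
      = pvGrid (fun x' y' => if x' = x ∧ y' = y then pvOp ins (g x' y') else g x' y') := by
  have hrow : PySem.List.pyGetD (pvGrid g) x ([] : List Int)
      = (PySem.List.pyRange 0 1000 1).map (fun y' => g x y') := by
    unfold pvGrid
    exact PySem.List.pyGetD_map_pyRange_of_nonneg _ 1000 x _ hx0 hx1
  have hv : PySem.List.pyGetD ((PySem.List.pyRange 0 1000 1).map (fun y' => g x y')) y 0 = g x y :=
    PySem.List.pyGetD_map_pyRange_of_nonneg _ 1000 y _ hy0 hy1
  simp only [hrow, hv]
  rw [pvRowSet _ y _ hy0 hy1, pvGridSet _ _ _ hx0 hx1]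
  apply pvGrid_congr
  intro x' y'
  by_cases hx : x' = x <;> by_cases hy : y' = y <;> simp [hx, hy, pvOp]

theorem pvInner (ins : String) (x y1 : Int) (hx0 : 0 ≤ x) (hx1 : x < 1000) (hy1 : 0 ≤ y1) :
    ∀ (n : Nat) (b : Int), b = y1 + n → b ≤ 1000 → ∀ g : Int → Int → Int,
    (PySem.List.pyRange y1 b 1).foldl (fun grid y =>
        let row := PySem.List.pyGetD grid x []
        let v := PySem.List.pyGetD row y 0
        let v' := if ins = "on" then v + 1
                  else if ins = "off" then (if v = 0 then 0 else v - 1)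
                  else v + 2
        PySem.List.pySetD grid x (PySem.List.pySetD row y v')) (pvGrid g)
      = pvGrid (fun x' y' => if x' = x ∧ y1 ≤ y' ∧ y' < b then pvOp ins (g x' y') else g x' y') := by
  intro n
  induction n with
  | zero =>
    intro b hb _ g
    rw [PySem.List.pyRange_one_eq_nil (by omega)]
    simp only [List.foldl_nil]
    exact pvGrid_congr (fun x' y' => by rw [if_neg (by omega)])
  | succ n ih =>
    intro b hb hble g
    have hb' : b = (y1 + n) + 1 := by omega
    rw [hb', PySem.List.pyRange_one_succ_right (by omega), List.foldl_append, List.foldl_cons,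
      List.foldl_nil, ih (y1 + n) rfl (by omega) g, pvStep ins _ x (y1 + n) hx0 hx1 (by omega) (by omega)]
    apply pvGrid_congr
    intro x' y'
    split_ifs <;> first | rfl | omega

theorem pvOuter (ins : String) (x1 y1 y2 : Int) (hx1 : 0 ≤ x1) (hy1 : 0 ≤ y1) (hy2 : y2 ≤ 999)
    (hyne : y1 ≤ y2) :
    ∀ (n : Nat) (b : Int), b = x1 + n → b ≤ 1000 → ∀ g : Int → Int → Int,
    (PySem.List.pyRange x1 b 1).foldl (fun grid x =>
      (PySem.List.pyRange y1 (y2 + 1) 1).foldl (fun grid y =>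
        let row := PySem.List.pyGetD grid x []
        let v := PySem.List.pyGetD row y 0
        let v' := if ins = "on" then v + 1
                  else if ins = "off" then (if v = 0 then 0 else v - 1)
                  else v + 2
        PySem.List.pySetD grid x (PySem.List.pySetD row y v')) grid) (pvGrid g)
      = pvGrid (fun x' y' =>
          if x1 ≤ x' ∧ x' < b ∧ y1 ≤ y' ∧ y' ≤ y2 then pvOp ins (g x' y') else g x' y') := by
  intro n
  induction n with
  | zero =>
    intro b hb _ g
    rw [show PySem.List.pyRange x1 b 1 = [] from PySem.List.pyRange_one_eq_nil (by omega)]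
    simp only [List.foldl_nil]
    exact pvGrid_congr (fun x' y' => by rw [if_neg (by omega)])
  | succ n ih =>
    intro b hb hble g
    have hb' : b = (x1 + n) + 1 := by omega
    rw [hb', show PySem.List.pyRange x1 ((x1 + n) + 1) 1 = PySem.List.pyRange x1 (x1 + n) 1 ++ [x1 + n] from
        PySem.List.pyRange_one_succ_right (by omega),
      List.foldl_append, List.foldl_cons,
      List.foldl_nil, ih (x1 + n) rfl (by omega) g,
      pvInner ins (x1 + n) y1 (by omega) (by omega) hy1 (y2 + 1 - y1).toNat (y2 + 1)
        (by omega) (by omega)]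
    apply pvGrid_congr
    intro x' y'
    split_ifs <;> first | rfl | omega

theorem pvCmd (c : String × (Int × Int) × (Int × Int))
    (hc : (c.2.2.1 < c.2.1.1 ∨ c.2.2.2 < c.2.1.2) ∨
      (0 ≤ c.2.1.1 ∧ c.2.2.1 ≤ 999 ∧ 0 ≤ c.2.1.2 ∧ c.2.2.2 ≤ 999))
    (g : Int → Int → Int) :
    (PySem.List.pyRange c.2.1.1 (c.2.2.1 + 1) 1).foldl (fun grid x =>
      (PySem.List.pyRange c.2.1.2 (c.2.2.2 + 1) 1).foldl (fun grid y =>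
        let row := PySem.List.pyGetD grid x []
        let v := PySem.List.pyGetD row y 0
        let v' := if c.1 = "on" then v + 1
                  else if c.1 = "off" then (if v = 0 then 0 else v - 1)
                  else v + 2
        PySem.List.pySetD grid x (PySem.List.pySetD row y v')) grid) (pvGrid g)
      = pvGrid (fun x y =>
          if c.2.1.1 ≤ x ∧ x ≤ c.2.2.1 ∧ c.2.1.2 ≤ y ∧ y ≤ c.2.2.2 then pvOp c.1 (g x y)
          else g x y) := by
  obtain ⟨ins, ⟨x1, y1⟩, ⟨x2, y2⟩⟩ := c
  simp only at hc ⊢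
  by_cases hy : y2 < y1
  · rw [show PySem.List.pyRange y1 (y2 + 1) 1 = [] from PySem.List.pyRange_one_eq_nil (by omega)]
    simp only [List.foldl_nil, PySem.List.foldl_ignore]
    exact pvGrid_congr (fun x' y' => by rw [if_neg (by omega)])
  · by_cases hx : x2 < x1
    · rw [show PySem.List.pyRange x1 (x2 + 1) 1 = [] from PySem.List.pyRange_one_eq_nil (by omega)]
      simp only [List.foldl_nil]
      exact pvGrid_congr (fun x' y' => by rw [if_neg (by omega)])
    · have hg : 0 ≤ x1 ∧ x2 ≤ 999 ∧ 0 ≤ y1 ∧ y2 ≤ 999 := by omega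
      rw [pvOuter ins x1 y1 y2 (by omega) (by omega) (by omega) (by omega)
        (x2 + 1 - x1).toNat (x2 + 1) (by omega) (by omega) g]
      apply pvGrid_congr
      intro x' y'
      split_ifs <;> first | rfl | omega

theorem pvAll (data : List (String × (Int × Int) × (Int × Int))) (hp : Pre_part2 data) :
    ∀ g : Int → Int → Int,
    data.foldl (fun grid command =>
      let ins := command.1
      let x1 := command.2.1.1
      let y1 := command.2.1.2
      let x2 := command.2.2.1
      let y2 := command.2.2.2
      (PySem.List.pyRange x1 (x2 + 1) 1).foldl (fun grid x =>
        (PySem.List.pyRange y1 (y2 + 1) 1).foldl (fun grid y =>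
          let row := PySem.List.pyGetD grid x []
          let v := PySem.List.pyGetD row y 0
          let v' := if ins = "on" then v + 1
                    else if ins = "off" then (if v = 0 then 0 else v - 1)
                    else v + 2
          PySem.List.pySetD grid x (PySem.List.pySetD row y v')) grid) grid) (pvGrid g)
      = pvGrid (fun x y => data.foldl (fun v c =>
          if c.2.1.1 ≤ x ∧ x ≤ c.2.2.1 ∧ c.2.1.2 ≤ y ∧ y ≤ c.2.2.2 then pvOp c.1 v else v)
          (g x y)) := by
  induction data with
  | nil => intro g; simp
  | cons c rest ih =>
    intro g
    have hc := hp c (List.mem_cons_self ..)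
    have hrest : Pre_part2 rest := fun d hd => hp d (List.mem_cons_of_mem _ hd)
    simp only [List.foldl_cons]
    rw [pvCmd c hc g, ih hrest]

def pvVal (data : List (String × (Int × Int) × (Int × Int))) (x y : Int) : Int :=
  data.foldl (fun v c =>
    if c.2.1.1 ≤ x ∧ x ≤ c.2.2.1 ∧ c.2.1.2 ≤ y ∧ y ≤ c.2.2.2 then pvOp c.1 v else v) 0

theorem part2_eq_sum (data : List (String × (Int × Int) × (Int × Int))) (hp : Pre_part2 data) :
    part2 data = ((PySem.List.pyRange 0 1000 1).map (fun x =>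
      ((PySem.List.pyRange 0 1000 1).map (fun y => pvVal data x y)).sum)).sum := by
  show ((data.foldl _ (pvGrid (fun _ _ => (0 : Int)))).map (fun row => row.sum)).sum = _
  rw [pvAll data hp (fun _ _ => 0)]
  simp only [pvGrid, List.map_map, Function.comp_def, pvVal]

theorem pvRel_run (data : List (String × (Int × Int) × (Int × Int))) (xa ya : Int) :
    ∀ v0 : Int,
    ((data.filter (fun c => decide (c.2.1.1 ≤ xa ∧ xa ≤ c.2.2.1))).map
      (fun c => (c.1, c.2.1.2, c.2.2.2))).foldl (fun v r =>
        if r.2.1 ≤ ya ∧ ya ≤ r.2.2 then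
          (if r.1 = "on" then v + 1 else if r.1 = "off" then (if v = 0 then 0 else v - 1) else v + 2)
        else v) v0
      = data.foldl (fun v c =>
          if c.2.1.1 ≤ xa ∧ xa ≤ c.2.2.1 ∧ c.2.1.2 ≤ ya ∧ ya ≤ c.2.2.2 then pvOp c.1 v else v) v0 := by
  induction data with
  | nil => intro v0; rfl
  | cons c rest ih =>
    intro v0
    simp only [List.filter_cons, decide_eq_true_eq, List.foldl_cons]
    by_cases hx : c.2.1.1 ≤ xa ∧ xa ≤ c.2.2.1
    · rw [if_pos hx, List.map_cons, List.foldl_cons, ih]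
      by_cases hy : c.2.1.2 ≤ ya ∧ ya ≤ c.2.2.2
      · rw [if_pos hy,
          if_pos (show c.2.1.1 ≤ xa ∧ xa ≤ c.2.2.1 ∧ c.2.1.2 ≤ ya ∧ ya ≤ c.2.2.2 from
            ⟨hx.1, hx.2, hy.1, hy.2⟩)]
        rfl
      · rw [if_neg hy, if_neg (by tauto)]
    · rw [if_neg hx, ih, if_neg (by tauto)]

-- Adjacent pairs of a sorted nodup list: strictly increasing, and no element lies strictly between.

theorem pvAdj (l : List Int) (hnd : l.Nodup) (hpw : List.Pairwise (· ≤ ·) l)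
    {p : Int × Int} (hp : p ∈ l.zip l.tail) :
    p.1 ∈ l ∧ p.2 ∈ l ∧ p.1 < p.2 ∧ ∀ t ∈ l, t ≤ p.1 ∨ p.2 ≤ t := by
  obtain ⟨k, hk, hkp⟩ := List.getElem_of_mem hp
  have hkl : k + 1 < l.length := by
    have := hk
    simp only [List.length_zip, List.length_tail] at this
    omega
  have hp1 : p.1 = l[k] := by
    subst hkp; simp [List.getElem_zip]
  have hp2 : p.2 = l[k + 1] := by
    subst hkp; simp [List.getElem_zip, List.getElem_tail]
  have hmono := List.pairwise_iff_getElem.mp hpw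
  have hne : l[k] ≠ l[k + 1] := by
    intro h
    exact absurd (List.Nodup.getElem_inj_iff hnd |>.mp h) (by omega)
  refine ⟨hp1 ▸ List.getElem_mem _, hp2 ▸ List.getElem_mem _, ?_, ?_⟩
  · have := hmono k (k + 1) (by omega) hkl (by omega)
    omega
  · intro t ht
    obtain ⟨j, hj, hjt⟩ := List.getElem_of_mem ht
    by_cases hjk : j ≤ k
    · left
      rcases Nat.eq_or_lt_of_le hjk with h | h
      · subst h; omega
      · have := hmono j k (by omega) (by omega) h; omega
    · right
      rcases Nat.eq_or_lt_of_le (show k + 1 ≤ j by omega) with h | h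
      · subst h; omega
      · have := hmono (k + 1) j (by omega) (by omega) h; omega

theorem pvLeLast (c : Int) (l : List Int) (h : List.Pairwise (· ≤ ·) (c :: l)) :
    c ≤ (c :: l).getLast (by simp) := by
  cases l with
  | nil => simp
  | cons d l' =>
    rw [List.getLast_cons (by simp)]
    exact (List.pairwise_cons.mp h).1 _ (List.getLast_mem _)

-- Splitting a sum over [head, last) at the cut points.

theorem pvSplit (F : Int → Int) :
    ∀ (l : List Int) (a : Int), List.Pairwise (· ≤ ·) (a :: l) →
    ((PySem.List.pyRange a ((a :: l).getLast (by simp)) 1).map F).sum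
      = (((a :: l).zip l).map (fun p => ((PySem.List.pyRange p.1 p.2 1).map F).sum)).sum := by
  intro l
  induction l with
  | nil =>
    intro a _
    simp [PySem.List.pyRange_one_eq_nil (by omega : (a:Int) ≤ a)]
  | cons c l' ih =>
    intro a hpw
    have hac : a ≤ c := (List.pairwise_cons.mp hpw).1 c (by simp)
    have hpw' : List.Pairwise (· ≤ ·) (c :: l') := (List.pairwise_cons.mp hpw).2
    have hcl : c ≤ (c :: l').getLast (by simp) := pvLeLast c l' hpw'
    rw [List.getLast_cons (by simp),
      PySem.List.pyRange_one_append a c ((c :: l').getLast (by simp)) hac hcl,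
      List.map_append, List.sum_append, ih c hpw']
    simp [List.zip]

theorem pvConstX (data : List (String × (Int × Int) × (Int × Int))) (xa xb x : Int)
    (hx : ∀ c ∈ data, (pvClip c.2.1.1 ≤ xa ∨ xb ≤ pvClip c.2.1.1) ∧
      (pvClip (c.2.2.1 + 1) ≤ xa ∨ xb ≤ pvClip (c.2.2.1 + 1)))
    (h0 : 0 ≤ xa) (h1 : xb ≤ 1000) (h2 : xa ≤ x) (h3 : x < xb) (y : Int) :
    pvVal data x y = pvVal data xa y := by
  unfold pvVal
  apply PySem.List.foldl_congr_mem
  intro v c hc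
  have hcc := hx c hc
  have hiff : (c.2.1.1 ≤ x ∧ x ≤ c.2.2.1) ↔ (c.2.1.1 ≤ xa ∧ xa ≤ c.2.2.1) := by
    unfold pvClip at hcc; omega
  exact if_congr (by tauto) rfl rfl

theorem pvConstY (data : List (String × (Int × Int) × (Int × Int))) (ya yb y : Int)
    (hy : ∀ c ∈ data, (pvClip c.2.1.2 ≤ ya ∨ yb ≤ pvClip c.2.1.2) ∧
      (pvClip (c.2.2.2 + 1) ≤ ya ∨ yb ≤ pvClip (c.2.2.2 + 1)))
    (h0 : 0 ≤ ya) (h1 : yb ≤ 1000) (h2 : ya ≤ y) (h3 : y < yb) (x : Int) :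
    pvVal data x y = pvVal data x ya := by
  unfold pvVal
  apply PySem.List.foldl_congr_mem
  intro v c hc
  have hcc := hy c hc
  have hiff : (c.2.1.2 ≤ y ∧ y ≤ c.2.2.2) ↔ (c.2.1.2 ≤ ya ∧ ya ≤ c.2.2.2) := by
    unfold pvClip at hcc; omega
  exact if_congr (by tauto) rfl rfl

theorem pvAllLeLast : ∀ (l : List Int) (hne : l ≠ []), List.Pairwise (· ≤ ·) l →
    ∀ t ∈ l, t ≤ l.getLast hne := by
  intro l
  induction l with
  | nil => intro h; cases h rfl
  | cons a rest ih =>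
    intro _ hpw t ht
    cases rest with
    | nil => simp at ht ⊢; omega
    | cons b r =>
      rw [List.getLast_cons (by simp)]
      rcases List.mem_cons.mp ht with rfl | ht'
      · exact (List.pairwise_cons.mp hpw).1 _ (List.getLast_mem _)
      · exact ih (by simp) (List.pairwise_cons.mp hpw).2 t ht'

theorem pvCuts (L : List Int) (hb : ∀ t ∈ L, 0 ≤ t ∧ t ≤ 1000)
    (h0 : (0 : Int) ∈ L) (hk : (1000 : Int) ∈ L) :
    ∃ rest : List Int,
      PySem.List.sorted (PySem.Set.ofList L) (fun x => x) false = 0 :: rest ∧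
      (0 :: rest).Nodup ∧ List.Pairwise (· ≤ ·) ((0 : Int) :: rest) ∧
      (∀ z : Int, z ∈ 0 :: rest ↔ z ∈ L) ∧ ((0 :: rest).getLast (by simp) = 1000) := by
  have hperm := PySem.List.sorted_perm (PySem.Set.ofList L) (fun x => x) false
  have hmem : ∀ z : Int, z ∈ PySem.List.sorted (PySem.Set.ofList L) (fun x => x) false ↔ z ∈ L :=
    fun z => hperm.mem_iff.trans (PySem.Set.mem_ofList L z)
  have hnd : (PySem.List.sorted (PySem.Set.ofList L) (fun x => x) false).Nodup :=
    hperm.nodup_iff.mpr (PySem.Set.nodup_ofList L)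
  have hpw := PySem.List.sorted_pairwise (PySem.Set.ofList L) (fun x => x)
  cases hl : PySem.List.sorted (PySem.Set.ofList L) (fun x => x) false with
  | nil => exact absurd ((hmem 0).mpr h0) (by simp [hl])
  | cons a rest =>
    rw [hl] at hmem hnd hpw
    have ha : a = 0 := by
      have h1 : 0 ≤ a := (hb a ((hmem a).mp (by simp))).1
      rcases List.mem_cons.mp ((hmem 0).mpr h0) with h | h
      · omega
      · have := (List.pairwise_cons.mp hpw).1 0 h; omega
    subst ha
    refine ⟨rest, rfl, hnd, hpw, hmem, ?_⟩
    have hlast_mem := List.getLast_mem (l := (0 : Int) :: rest) (by simp)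
    have h1 : (((0 : Int) :: rest).getLast (by simp)) ≤ 1000 :=
      (hb _ ((hmem _).mp hlast_mem)).2
    have h2 : (1000 : Int) ≤ ((0 : Int) :: rest).getLast (by simp) :=
      pvAllLeLast _ (by simp) hpw 1000 ((hmem 1000).mpr hk)
    omega

-- ===== VERDICT (by name: the statement is the Claim_ definition above) =====
theorem part2_spec : Claim_equal_part2 := by
  intro data _hdom hpre
  unfold Spec_part2
  have hclip : ∀ v : Int, 0 ≤ pvClip v ∧ pvClip v ≤ 1000 := fun v => by unfold pvClip; omega
  -- the two cut lists
  obtain ⟨xr, hxeq, hxnd, hxpw, hxmem, hxlast⟩ :=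
    pvCuts ([(0 : Int), 1000] ++ data.map (fun c => pvClip c.2.1.1)
        ++ data.map (fun c => pvClip (c.2.2.1 + 1)))
      (by
        intro t ht
        simp only [List.mem_append, List.mem_cons, List.mem_map, List.not_mem_nil, or_false] at ht
        rcases ht with ((rfl | rfl) | ⟨c, _, rfl⟩) | ⟨c, _, rfl⟩ <;>
          first | omega | exact hclip _)
      (by simp) (by simp)
  obtain ⟨yr, hyeq, hynd, hypw, hymem, hylast⟩ :=
    pvCuts ([(0 : Int), 1000] ++ data.map (fun c => pvClip c.2.1.2)
        ++ data.map (fun c => pvClip (c.2.2.2 + 1)))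
      (by
        intro t ht
        simp only [List.mem_append, List.mem_cons, List.mem_map, List.not_mem_nil, or_false] at ht
        rcases ht with ((rfl | rfl) | ⟨c, _, rfl⟩) | ⟨c, _, rfl⟩ <;>
          first | omega | exact hclip _)
      (by simp) (by simp)
  -- B is the block-weighted double sum
  have hB : part2_alt data
      = (((0 :: xr).zip xr).map (fun p => (((0 :: yr).zip yr).map (fun q =>
          pvVal data p.1 q.1 * (p.2 - p.1) * (q.2 - q.1))).sum)).sum := by
    simp only [part2_alt]
    rw [hxeq, hyeq]
    simp only [List.tail_cons, PySem.List.foldl_add, pvRel_run, zero_add]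
    simp only [pvVal]
  -- constancy hypotheses per block
  have hxcond : ∀ p ∈ (0 :: xr).zip xr, ∀ c ∈ data,
      (pvClip c.2.1.1 ≤ p.1 ∨ p.2 ≤ pvClip c.2.1.1) ∧
      (pvClip (c.2.2.1 + 1) ≤ p.1 ∨ p.2 ≤ pvClip (c.2.2.1 + 1)) := by
    intro p hp c hc
    have hadj := pvAdj _ hxnd hxpw hp
    refine ⟨hadj.2.2.2 _ ((hxmem _).mpr ?_), hadj.2.2.2 _ ((hxmem _).mpr ?_)⟩
    · simp only [List.mem_append, List.mem_map]
      exact Or.inl (Or.inr ⟨c, hc, rfl⟩)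
    · simp only [List.mem_append, List.mem_map]
      exact Or.inr ⟨c, hc, rfl⟩
  have hycond : ∀ q ∈ (0 :: yr).zip yr, ∀ c ∈ data,
      (pvClip c.2.1.2 ≤ q.1 ∨ q.2 ≤ pvClip c.2.1.2) ∧
      (pvClip (c.2.2.2 + 1) ≤ q.1 ∨ q.2 ≤ pvClip (c.2.2.2 + 1)) := by
    intro q hq c hc
    have hadj := pvAdj _ hynd hypw hq
    refine ⟨hadj.2.2.2 _ ((hymem _).mpr ?_), hadj.2.2.2 _ ((hymem _).mpr ?_)⟩
    · simp only [List.mem_append, List.mem_map]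
      exact Or.inl (Or.inr ⟨c, hc, rfl⟩)
    · simp only [List.mem_append, List.mem_map]
      exact Or.inr ⟨c, hc, rfl⟩
  -- bounds of cut values
  have hxbnd : ∀ t ∈ (0 : Int) :: xr, 0 ≤ t ∧ t ≤ 1000 := by
    intro t ht
    rcases (List.mem_append.mp ((hxmem t).mp ht)) with h | h
    · rcases List.mem_append.mp h with h | h
      · simp only [List.mem_cons, List.not_mem_nil, or_false] at h
        rcases h with rfl | rfl <;> omega
      · obtain ⟨c, _, rfl⟩ := List.mem_map.mp h; exact hclip _
    · obtain ⟨c, _, rfl⟩ := List.mem_map.mp h; exact hclip _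
  have hybnd : ∀ t ∈ (0 : Int) :: yr, 0 ≤ t ∧ t ≤ 1000 := by
    intro t ht
    rcases (List.mem_append.mp ((hymem t).mp ht)) with h | h
    · rcases List.mem_append.mp h with h | h
      · simp only [List.mem_cons, List.not_mem_nil, or_false] at h
        rcases h with rfl | rfl <;> omega
      · obtain ⟨c, _, rfl⟩ := List.mem_map.mp h; exact hclip _
    · obtain ⟨c, _, rfl⟩ := List.mem_map.mp h; exact hclip _
  -- split the inner (y) sum at the cuts, for every x
  have hysplit : ∀ x : Int,
      ((PySem.List.pyRange 0 1000 1).map (fun y => pvVal data x y)).sum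
        = (((0 :: yr).zip yr).map (fun q => (q.2 - q.1) * pvVal data x q.1)).sum := by
    intro x
    have hs := pvSplit (fun y => pvVal data x y) yr 0 hypw
    rw [hylast] at hs
    rw [hs]
    refine congrArg List.sum (List.map_congr_left ?_)
    intro q hq
    have hadj := pvAdj _ hynd hypw hq
    have hq1 := hybnd q.1 hadj.1
    have hq2 := hybnd q.2 hadj.2.1
    have hconst : ∀ y ∈ PySem.List.pyRange q.1 q.2 1, pvVal data x y = pvVal data x q.1 := by
      intro y hy
      have hy' := PySem.List.mem_pyRange_one.mp hy
      exact pvConstY data q.1 q.2 y (fun c hc => hycond q hq c hc) hq1.1 hq2.2 hy'.1 hy'.2 x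
    rw [List.map_congr_left hconst, PySem.List.sum_map_const_int, PySem.List.length_pyRange_one]
    have hcast : (((q.2 - q.1).toNat : Int)) = q.2 - q.1 := by
      have := hadj.2.2.1; omega
    rw [hcast]
  rw [part2_eq_sum data hpre, hB]
  simp only [hysplit]
  have hs := pvSplit (fun x => (((0 :: yr).zip yr).map
    (fun q => (q.2 - q.1) * pvVal data x q.1)).sum) xr 0 hxpw
  rw [hxlast] at hs
  rw [hs]
  refine congrArg List.sum (List.map_congr_left ?_)
  intro p hp
  have hadj := pvAdj _ hxnd hxpw hp
  have hp1 := hxbnd p.1 hadj.1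
  have hp2 := hxbnd p.2 hadj.2.1
  have hconst : ∀ x ∈ PySem.List.pyRange p.1 p.2 1,
      (((0 :: yr).zip yr).map (fun q => (q.2 - q.1) * pvVal data x q.1)).sum
        = (((0 :: yr).zip yr).map (fun q => (q.2 - q.1) * pvVal data p.1 q.1)).sum := by
    intro x hx
    have hx' := PySem.List.mem_pyRange_one.mp hx
    refine congrArg List.sum (List.map_congr_left ?_)
    intro q _
    rw [pvConstX data p.1 p.2 x (fun c hc => hxcond p hp c hc) hp1.1 hp2.2 hx'.1 hx'.2 q.1]
  rw [List.map_congr_left hconst, PySem.List.sum_map_const_int, PySem.List.length_pyRange_one]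
  have hcast : (((p.2 - p.1).toNat : Int)) = p.2 - p.1 := by
    have := hadj.2.2.1; omega
  rw [hcast, ← List.sum_map_mul_left]
  refine congrArg List.sum (List.map_congr_left ?_)
  intro q _
  ring
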